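-- pv_equiv track=rewrite | github.com/MDoerner/AdventOfCode2019 | AdventOfCodeIn2019InPython/AdventOfCode20191203_2.py | section_intersections
-- ===== SOURCE A (Python) =====
-- def section_intersections(horizontal_sections, vertical_sections):
--     intersections = []
--     for horizontal_section in horizontal_sections:
--         for vertical_section in vertical_sections:
--             intersection = section_intersection(horizontal_section, vertical_section)
--             if intersection != None:
--                 intersections.append(intersection)
--     return intersections
--
-- def section_intersection(horizontal_section, vertical_section):
--     ((x_1_h, y_1_h), end_point_h) = horizontal_section
--     ((x_1_v, y_1_v), end_point_v) = vertical_section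
--     potential_intersection = (x_1_v, y_1_h)
--     if is_in_section(potential_intersection, horizontal_section) and is_in_section(potential_intersection, vertical_section):
--         return potential_intersection
--     return None
--
-- def is_in_section(point, section):
--     (x, y) = point
--     ((x_1, y_1), (x_2, y_2)) = section
--     return (x_1 <= x <= x_2 or x_1 >= x >= x_2) and (y_1 <= y <= y_2 or y_1 >= y >= y_2)
-- ===== SOURCE B (Python) =====
-- from bisect import bisect_left, bisect_right
--
--
-- def section_intersections(horizontal_sections, vertical_sections):
--     # Index the verticals once: (x, original index, y-lo, y-hi), sorted by x.
--     entries = sorted(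
--         ((x1, i, min(y1, y2), max(y1, y2))
--          for i, ((x1, y1), (x2, y2)) in enumerate(vertical_sections)),
--         key=lambda e: e[0])
--     xs = [e[0] for e in entries]
--     result = []
--     for ((hx1, hy), (hx2, _)) in horizontal_sections:
--         lo, hi = min(hx1, hx2), max(hx1, hx2)
--         matches = [(i, x)
--                    for (x, i, ylo, yhi)
--                    in entries[bisect_left(xs, lo):bisect_right(xs, hi)]
--                    if ylo <= hy <= yhi]
--         matches.sort(key=lambda m: m[0])
--         result.extend((x, hy) for (i, x) in matches)
--     return result
-- ===== Notes on version B (the rewrite author's own statement) =====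
-- stated objective: faster
-- what changed: Replaced A's nested H×V all-pairs scan by building an x-sorted index of the verticals once and answering each horizontal with a bisect range query, re-sorting each horizontal's few matches by original vertical index to restore A's output order.
import Mathlib
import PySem

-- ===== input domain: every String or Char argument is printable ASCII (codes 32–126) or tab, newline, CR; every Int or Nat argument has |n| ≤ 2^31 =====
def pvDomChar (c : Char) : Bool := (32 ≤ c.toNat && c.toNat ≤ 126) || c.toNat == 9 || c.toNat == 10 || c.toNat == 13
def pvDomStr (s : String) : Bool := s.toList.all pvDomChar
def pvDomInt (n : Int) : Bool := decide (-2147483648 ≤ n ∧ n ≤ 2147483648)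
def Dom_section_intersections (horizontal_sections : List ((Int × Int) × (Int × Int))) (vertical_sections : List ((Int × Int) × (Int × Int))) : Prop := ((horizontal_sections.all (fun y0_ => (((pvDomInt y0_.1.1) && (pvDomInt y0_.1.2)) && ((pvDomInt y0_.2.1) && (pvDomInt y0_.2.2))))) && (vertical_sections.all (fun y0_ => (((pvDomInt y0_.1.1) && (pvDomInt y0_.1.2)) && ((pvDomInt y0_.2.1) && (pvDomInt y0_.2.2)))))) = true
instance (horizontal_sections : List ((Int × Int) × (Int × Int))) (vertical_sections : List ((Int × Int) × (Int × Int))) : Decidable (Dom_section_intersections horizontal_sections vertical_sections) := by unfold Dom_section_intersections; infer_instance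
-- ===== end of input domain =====

-- B replaces A's nested H×V scan by an x-sorted index over the verticals queried with
-- binary search (bisect) per horizontal, restoring A's output order by sorting each
-- horizontal's matches by original vertical index; objective: faster.

-- ===== PORT A =====
def pvIsInSection (point : Int × Int) (sec : (Int × Int) × (Int × Int)) : Bool :=
  (decide ((sec.1.1 ≤ point.1 ∧ point.1 ≤ sec.2.1) ∨ (sec.1.1 ≥ point.1 ∧ point.1 ≥ sec.2.1))) &&
  (decide ((sec.1.2 ≤ point.2 ∧ point.2 ≤ sec.2.2) ∨ (sec.1.2 ≥ point.2 ∧ point.2 ≥ sec.2.2)))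

def pvSectionIntersection (horizontal_section vertical_section : (Int × Int) × (Int × Int)) : Option (Int × Int) :=
  let potential_intersection := (vertical_section.1.1, horizontal_section.1.2)
  if pvIsInSection potential_intersection horizontal_section &&
     pvIsInSection potential_intersection vertical_section then
    some potential_intersection
  else none

def section_intersections (horizontal_sections : List ((Int × Int) × (Int × Int))) (vertical_sections : List ((Int × Int) × (Int × Int))) : List (Int × Int) :=
  horizontal_sections.foldl (fun intersections horizontal_section =>
    vertical_sections.foldl (fun intersections vertical_section =>
      match pvSectionIntersection horizontal_section vertical_section with
      | some intersection => intersections ++ [intersection]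
      | none => intersections) intersections) []

-- ===== PORT B =====
-- (x1, original index, min y, max y) for one enumerated vertical section
def pvEntry (p : Int × ((Int × Int) × (Int × Int))) : Int × Int × Int × Int :=
  (p.2.1.1, p.1, min p.2.1.2 p.2.2.2, max p.2.1.2 p.2.2.2)

def section_intersections_alt (horizontal_sections : List ((Int × Int) × (Int × Int))) (vertical_sections : List ((Int × Int) × (Int × Int))) : List (Int × Int) :=
  let entries := PySem.List.sorted ((PySem.List.enumerate vertical_sections 0).map pvEntry) (fun e => e.1)
  let xs := entries.map (fun e => e.1)
  horizontal_sections.foldl (fun result h =>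
    let lo := min h.1.1 h.2.1
    let hi := max h.1.1 h.2.1
    let seg := PySem.List.slice entries (some ((PySem.List.bisectLeft xs lo : Nat) : Int)) (some ((PySem.List.bisectRight xs hi : Nat) : Int))
    let ms0 := (seg.filter (fun e => decide (e.2.2.1 ≤ h.1.2 ∧ h.1.2 ≤ e.2.2.2))).map (fun e => (e.2.1, e.1))
    let ms := PySem.List.sorted ms0 (fun m => m.1)
    result ++ ms.map (fun m => (m.2, h.1.2))) []

-- ===== PRECONDITION & SPEC =====
def Spec_section_intersections (horizontal_sections : List ((Int × Int) × (Int × Int))) (vertical_sections : List ((Int × Int) × (Int × Int))) (out : List (Int × Int)) : Prop := out = section_intersections_alt horizontal_sections vertical_sections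
instance (horizontal_sections : List ((Int × Int) × (Int × Int))) (vertical_sections : List ((Int × Int) × (Int × Int))) (out : List (Int × Int)) : Decidable (Spec_section_intersections horizontal_sections vertical_sections out) := by unfold Spec_section_intersections; infer_instance

-- ===== CLAIM (what is proved, stated in full; the proofs are below) =====
def Claim_equal_section_intersections : Prop := ∀ (horizontal_sections : List ((Int × Int) × (Int × Int))) (vertical_sections : List ((Int × Int) × (Int × Int))), Dom_section_intersections horizontal_sections vertical_sections → Spec_section_intersections horizontal_sections vertical_sections (section_intersections horizontal_sections vertical_sections)

-- ===== LEMMAS AND PROOFS =====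

-- A's inner loop over the verticals is a filterMap
lemma pvInnerA (h : (Int × Int) × (Int × Int)) (V : List ((Int × Int) × (Int × Int))) (acc : List (Int × Int)) :
    V.foldl (fun intersections vertical_section =>
      match pvSectionIntersection h vertical_section with
      | some intersection => intersections ++ [intersection]
      | none => intersections) acc = acc ++ V.filterMap (pvSectionIntersection h) := by
  induction V generalizing acc with
  | nil => simp
  | cons v vs ih =>
    simp only [List.foldl_cons, List.filterMap_cons]
    cases hv : pvSectionIntersection h v with
    | none => simp [ih]
    | some p => simp [ih]

lemma pvA_flat (H V : List ((Int × Int) × (Int × Int))) :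
    section_intersections H V = H.flatMap (fun h => V.filterMap (pvSectionIntersection h)) := by
  unfold section_intersections
  have hstep : (fun (intersections : List (Int × Int)) (h : (Int × Int) × (Int × Int)) =>
      V.foldl (fun intersections vertical_section =>
        match pvSectionIntersection h vertical_section with
        | some intersection => intersections ++ [intersection]
        | none => intersections) intersections)
      = fun intersections h => intersections ++ V.filterMap (pvSectionIntersection h) := by
    funext acc h; exact pvInnerA h V acc
  rw [hstep, PySem.List.foldl_append_eq_flatMap]
  simp

-- bisect slice of an x-sorted list is the x-window filter
lemma pvSliceWindow (E : List (Int × Int × Int × Int)) (lo hi : Int) (hlohi : lo ≤ hi)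
    (hpw : E.Pairwise (fun a b => a.1 ≤ b.1)) :
    List.take (PySem.List.bisectRight (E.map (fun e => e.1)) hi - PySem.List.bisectLeft (E.map (fun e => e.1)) lo)
      (List.drop (PySem.List.bisectLeft (E.map (fun e => e.1)) lo) E)
      = E.filter (fun e => decide (lo ≤ e.1) && decide (e.1 ≤ hi)) := by
  set xs := E.map (fun e => e.1) with hxs
  have hxspw : xs.Pairwise (· ≤ ·) := by
    rw [hxs, List.pairwise_map]; exact hpw
  obtain ⟨hbl_le, hbl_lt, hbl_ge⟩ := PySem.List.bisectLeft_spec xs lo hxspw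
  obtain ⟨hbr_le, hbr_lt, hbr_ge⟩ := PySem.List.bisectRight_spec xs hi hxspw
  set bl := PySem.List.bisectLeft xs lo with hbl
  set br := PySem.List.bisectRight xs hi with hbr
  have hlen : xs.length = E.length := by simp [hxs]
  have hget : ∀ (j : Nat) (hj : j < E.length), xs[j]'(by omega) = E[j].1 := by
    intro j hj; simp [hxs]
  have hblbr : bl ≤ br := by
    by_contra hcon
    have hbrn : br < xs.length := by omega
    have h1 : xs[br] < lo := hbl_lt br hbrn (by omega)
    have h2 : hi < xs[br] := hbr_ge br hbrn (by omega)
    omega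
  have hsplit : E = E.take bl ++ (List.take (br - bl) (List.drop bl E) ++ List.drop br E) := by
    conv_lhs => rw [← List.take_append_drop bl E]
    congr 1
    conv_lhs => rw [← List.take_append_drop (br - bl) (List.drop bl E)]
    congr 1
    rw [List.drop_drop]
    congr 1
    omega
  have hfirst : (E.take bl).filter (fun e => decide (lo ≤ e.1) && decide (e.1 ≤ hi)) = [] := by
    rw [List.filter_eq_nil_iff]
    intro a ha
    rw [List.mem_take_iff_getElem] at ha
    obtain ⟨i, hi', hEi⟩ := ha
    have hiE : i < E.length := by omega
    have := hbl_lt i (by omega) (by omega)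
    rw [hget i hiE] at this
    simp only [← hEi]
    simp only [Bool.and_eq_true, decide_eq_true_eq, not_and]
    omega
  have hmid : (List.take (br - bl) (List.drop bl E)).filter (fun e => decide (lo ≤ e.1) && decide (e.1 ≤ hi)) = List.take (br - bl) (List.drop bl E) := by
    rw [List.filter_eq_self]
    intro a ha
    rw [List.mem_take_iff_getElem] at ha
    obtain ⟨i, hi', hEi⟩ := ha
    have hdl : (List.drop bl E).length = E.length - bl := by simp
    have hiE : bl + i < E.length := by omega
    have hEi' : E[bl + i]'hiE = a := by rw [← hEi, List.getElem_drop]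
    have h1 := hbl_ge (bl + i) (by omega) (by omega)
    have h2 := hbr_lt (bl + i) (by omega) (by omega)
    rw [hget (bl + i) hiE] at h1 h2
    rw [hEi'] at h1 h2
    simp only [Bool.and_eq_true, decide_eq_true_eq]
    omega
  have hlast : (List.drop br E).filter (fun e => decide (lo ≤ e.1) && decide (e.1 ≤ hi)) = [] := by
    rw [List.filter_eq_nil_iff]
    intro a ha
    obtain ⟨j, hj, hEj⟩ := List.getElem_of_mem ha
    have hdl : (List.drop br E).length = E.length - br := by simp
    have hjE : br + j < E.length := by omega
    have hEj' : E[br + j]'hjE = a := by rw [← List.getElem_drop]; exact hEj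
    have := hbr_ge (br + j) (by omega) (by omega)
    rw [hget (br + j) hjE, hEj'] at this
    simp only [Bool.and_eq_true, decide_eq_true_eq, not_and]
    omega
  conv_rhs => rw [hsplit]
  rw [List.filter_append, List.filter_append, hfirst, hmid, hlast]
  simp

-- pointwise: B's window/y test on an entry is exactly A's intersection test
lemma pvCondEq (h v : (Int × Int) × (Int × Int)) (s : Int) :
    ((decide ((pvEntry (s, v)).2.2.1 ≤ h.1.2 ∧ h.1.2 ≤ (pvEntry (s, v)).2.2.2)) &&
     ((decide (min h.1.1 h.2.1 ≤ (pvEntry (s, v)).1)) && (decide ((pvEntry (s, v)).1 ≤ max h.1.1 h.2.1))))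
      = (pvIsInSection (v.1.1, h.1.2) h && pvIsInSection (v.1.1, h.1.2) v) := by
  simp only [pvEntry, pvIsInSection]
  rw [Bool.eq_iff_iff]
  simp only [Bool.and_eq_true, decide_eq_true_eq]
  constructor <;> intro hh <;> omega

-- the enumerated, filtered, projected verticals are A's filterMap
lemma pvEnumFilter (h : (Int × Int) × (Int × Int)) (V : List ((Int × Int) × (Int × Int))) (s : Int) :
    ((PySem.List.enumerate V s).filter (fun p =>
        (decide ((pvEntry p).2.2.1 ≤ h.1.2 ∧ h.1.2 ≤ (pvEntry p).2.2.2)) &&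
        ((decide (min h.1.1 h.2.1 ≤ (pvEntry p).1)) && (decide ((pvEntry p).1 ≤ max h.1.1 h.2.1))))).map
      (fun p => (p.2.1.1, h.1.2))
      = V.filterMap (pvSectionIntersection h) := by
  induction V generalizing s with
  | nil => simp [PySem.List.enumerate]
  | cons v vs ih =>
    have hen : PySem.List.enumerate (v :: vs) s = (s, v) :: PySem.List.enumerate vs (s + 1) := by
      simp [PySem.List.enumerate]
    rw [hen, List.filter_cons, List.filterMap_cons]
    have hc := pvCondEq h v s
    cases hcond : (pvIsInSection (v.1.1, h.1.2) h && pvIsInSection (v.1.1, h.1.2) v) with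
    | false =>
      rw [hcond] at hc
      simp only [hc, Bool.false_eq_true, if_false, ih]
      have : pvSectionIntersection h v = none := by
        simp only [pvSectionIntersection]
        rw [if_neg]
        simp [hcond]
      rw [this]
    | true =>
      rw [hcond] at hc
      simp only [hc, if_true, List.map_cons, ih]
      have : pvSectionIntersection h v = some (v.1.1, h.1.2) := by
        simp only [pvSectionIntersection]
        rw [if_pos]
        simp [hcond]
      rw [this]

-- B's whole per-horizontal contribution equals A's inner filterMap
lemma pvContrib (h : (Int × Int) × (Int × Int)) (V : List ((Int × Int) × (Int × Int))) :
    (PySem.List.sorted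
      (((PySem.List.slice (PySem.List.sorted ((PySem.List.enumerate V 0).map pvEntry) (fun e => e.1))
          (some ((PySem.List.bisectLeft ((PySem.List.sorted ((PySem.List.enumerate V 0).map pvEntry) (fun e => e.1)).map (fun e => e.1)) (min h.1.1 h.2.1) : Nat) : Int))
          (some ((PySem.List.bisectRight ((PySem.List.sorted ((PySem.List.enumerate V 0).map pvEntry) (fun e => e.1)).map (fun e => e.1)) (max h.1.1 h.2.1) : Nat) : Int))).filter
          (fun e => decide (e.2.2.1 ≤ h.1.2 ∧ h.1.2 ≤ e.2.2.2))).map (fun e => (e.2.1, e.1)))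
      (fun m => m.1)).map (fun m => (m.2, h.1.2))
      = V.filterMap (pvSectionIntersection h) := by
  set E := PySem.List.sorted ((PySem.List.enumerate V 0).map pvEntry) (fun e => e.1) with hE
  have hpw : E.Pairwise (fun a b => a.1 ≤ b.1) :=
    PySem.List.sorted_pairwise ((PySem.List.enumerate V 0).map pvEntry) (fun e => e.1)
  rw [PySem.List.slice_natCast, pvSliceWindow E (min h.1.1 h.2.1) (max h.1.1 h.2.1) min_le_max hpw]
  rw [List.filter_filter]
  set P : Int × Int × Int × Int → Bool := fun e =>
    (decide (e.2.2.1 ≤ h.1.2 ∧ h.1.2 ≤ e.2.2.2)) &&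
    ((decide (min h.1.1 h.2.1 ≤ e.1)) && (decide (e.1 ≤ max h.1.1 h.2.1))) with hP
  have hperm : E.Perm ((PySem.List.enumerate V 0).map pvEntry) :=
    PySem.List.sorted_perm _ _ _
  -- target list, in original index order
  set T := (((PySem.List.enumerate V 0).filter (fun p => P (pvEntry p))).map (fun p => ((pvEntry p).2.1, (pvEntry p).1))) with hT
  have hTperm : T.Perm ((E.filter P).map (fun e => (e.2.1, e.1))) := by
    have h1 : ((PySem.List.enumerate V 0).map pvEntry).filter P
        = ((PySem.List.enumerate V 0).filter (fun p => P (pvEntry p))).map pvEntry := by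
      rw [List.filter_map]; rfl
    have h2 := (hperm.filter P).map (fun e : Int × Int × Int × Int => (e.2.1, e.1))
    rw [h1, List.map_map] at h2
    exact h2.symm
  have hTpw : T.Pairwise (fun a b => a.1 < b.1) := by
    rw [hT, List.pairwise_map]
    refine List.Pairwise.imp ?_ (List.Pairwise.filter _ (PySem.List.pairwise_lt_enumerate V 0))
    intro a b hab
    simpa [pvEntry] using hab
  rw [PySem.List.sorted_eq_of_perm_of_pairwise_lt _ T (fun m => m.1) hTperm hTpw]
  rw [hT, List.map_map]
  have := pvEnumFilter h V 0
  rw [← this]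
  rfl

lemma pvB_flat (H V : List ((Int × Int) × (Int × Int))) :
    section_intersections_alt H V = H.flatMap (fun h => V.filterMap (pvSectionIntersection h)) := by
  unfold section_intersections_alt
  have hstep : ∀ (acc : List (Int × Int)) (h : (Int × Int) × (Int × Int)),
      acc ++ ((PySem.List.sorted
        (((PySem.List.slice (PySem.List.sorted ((PySem.List.enumerate V 0).map pvEntry) (fun e => e.1))
            (some ((PySem.List.bisectLeft ((PySem.List.sorted ((PySem.List.enumerate V 0).map pvEntry) (fun e => e.1)).map (fun e => e.1)) (min h.1.1 h.2.1) : Nat) : Int))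
            (some ((PySem.List.bisectRight ((PySem.List.sorted ((PySem.List.enumerate V 0).map pvEntry) (fun e => e.1)).map (fun e => e.1)) (max h.1.1 h.2.1) : Nat) : Int))).filter
            (fun e => decide (e.2.2.1 ≤ h.1.2 ∧ h.1.2 ≤ e.2.2.2))).map (fun e => (e.2.1, e.1)))
        (fun m => m.1)).map (fun m => (m.2, h.1.2)))
      = acc ++ V.filterMap (pvSectionIntersection h) := by
    intro acc h
    rw [pvContrib h V]
  calc H.foldl (fun result h =>
        result ++ ((PySem.List.sorted
          (((PySem.List.slice (PySem.List.sorted ((PySem.List.enumerate V 0).map pvEntry) (fun e => e.1))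
              (some ((PySem.List.bisectLeft ((PySem.List.sorted ((PySem.List.enumerate V 0).map pvEntry) (fun e => e.1)).map (fun e => e.1)) (min h.1.1 h.2.1) : Nat) : Int))
              (some ((PySem.List.bisectRight ((PySem.List.sorted ((PySem.List.enumerate V 0).map pvEntry) (fun e => e.1)).map (fun e => e.1)) (max h.1.1 h.2.1) : Nat) : Int))).filter
              (fun e => decide (e.2.2.1 ≤ h.1.2 ∧ h.1.2 ≤ e.2.2.2))).map (fun e => (e.2.1, e.1)))
          (fun m => m.1)).map (fun m => (m.2, h.1.2)))) []
      = H.foldl (fun result h => result ++ V.filterMap (pvSectionIntersection h)) [] := by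
        congr 1
        funext acc h
        exact hstep acc h
    _ = H.flatMap (fun h => V.filterMap (pvSectionIntersection h)) := by
        rw [PySem.List.foldl_append_eq_flatMap]
        simp

-- ===== VERDICT (by name: the statement is the Claim_ definition above) =====
theorem section_intersections_spec : Claim_equal_section_intersections := by
  intro H V _
  unfold Spec_section_intersections
  rw [pvA_flat, pvB_flat]
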